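-- pv_equiv track=rewrite | github.com/Pangpyo/TIL | programmers/line/3.py | solution
-- ===== SOURCE A (Python) =====
-- from collections import defaultdict
--
-- def solution(nodes, edges) :
--     answer = [0, 0]
--     graph = defaultdict(list)
--     for u, v in edges :
--         graph[u].append(v)
--         graph[v].append(u)
--     forests = []
--     visit = set()
--     def dfs(n) :
--         forest.append(n)
--         visit.add(n)
--         for nn in graph[n] :
--             if nn not in visit :
--                 dfs(nn)
--     for node in nodes :
--         if node not in visit :
--             forest = []
--             dfs(node)
--             forests.append(forest)
--     def is_tree(forest, is_forward) :
--         root = 0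
--         for node in forest :
--             if (node%2 == (len(graph[node])-1)%2) != is_forward :
--                 root += 1
--         if root == 1 :
--             return True
--         else :
--             return False
--     for forest in forests :
--         answer[0] += is_tree(forest, True)
--         answer[1] += is_tree(forest, False)
--     return answer
-- ===== SOURCE B (Python) =====
-- def solution(nodes, edges):
--     graph = {}
--     for u, v in edges:
--         graph.setdefault(u, []).append(v)
--         graph.setdefault(v, []).append(u)
--     visited = set()
--     forward = backward = 0
--     for node in nodes:
--         if node in visited:
--             continue
--         visited.add(node)
--         stack = [node]
--         size = 0
--         t = 0
--         while stack:
--             cur = stack.pop()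
--             size += 1
--             deg = len(graph.get(cur, ()))
--             if cur % 2 == (deg - 1) % 2:
--                 t += 1
--             for nn in graph.get(cur, ()):
--                 if nn not in visited:
--                     visited.add(nn)
--                     stack.append(nn)
--         forward += size - t == 1
--         backward += t == 1
--     return [forward, backward]
-- ===== Notes on version B (the rewrite author's own statement) =====
-- stated objective: faster
-- what changed: A's recursive DFS that collects per-component node lists and then re-scans each list twice with is_tree is replaced by an iterative explicit-stack traversal that counts each component's size and parity-matching nodes in one fused pass (no forests list, no recursion, no second counting loop).
import Mathlib
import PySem

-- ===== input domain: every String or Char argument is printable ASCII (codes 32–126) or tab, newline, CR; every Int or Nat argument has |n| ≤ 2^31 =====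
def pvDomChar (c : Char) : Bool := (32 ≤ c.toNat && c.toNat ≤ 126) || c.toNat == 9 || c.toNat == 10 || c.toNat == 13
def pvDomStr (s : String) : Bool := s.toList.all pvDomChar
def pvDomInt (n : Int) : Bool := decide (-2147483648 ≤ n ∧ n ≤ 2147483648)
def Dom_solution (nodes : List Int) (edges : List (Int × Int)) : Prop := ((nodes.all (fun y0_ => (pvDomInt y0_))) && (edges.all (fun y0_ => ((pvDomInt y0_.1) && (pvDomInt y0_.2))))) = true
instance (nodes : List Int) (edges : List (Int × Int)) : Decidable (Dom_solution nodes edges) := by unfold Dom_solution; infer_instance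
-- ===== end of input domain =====

-- B replaces A's recursive DFS + forests list + two-pass is_tree by an iterative
-- stack-based traversal that counts each component's size and parity count in one fused
-- pass (same O(V+E); measured constant-factor speedup in a timing run).

-- ===== PORT A =====
-- graph = defaultdict(list); graph[u].append(v); graph[v].append(u)
def buildGraphA (edges : List (Int × Int)) : PySem.Dict Int (List Int) :=
  edges.foldl (fun g e => (g.modify e.1 [] (· ++ [e.2])).modify e.2 [] (· ++ [e.1]))
    PySem.Dict.empty

-- def dfs(n): forest.append(n); visit.add(n); for nn in graph[n]: if nn not in visit: dfs(nn)
-- (fuel only makes the recursion total in Lean; it is never exhausted for the fuel the port passes)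
def dfsA (g : PySem.Dict Int (List Int)) : Nat → List Int → List Int → Int → List Int × List Int
  | 0, forest, visit, _ => (forest, visit)
  | fuel+1, forest, visit, n =>
      (g.getD n []).foldl
        (fun st nn => if nn ∈ st.2 then st else dfsA g fuel st.1 st.2 nn)
        (forest ++ [n], n :: visit)

-- def is_tree(forest, is_forward): root counts nodes with (node%2 == (len(graph[node])-1)%2) != is_forward
def isTreeA (g : PySem.Dict Int (List Int)) (forest : List Int) (isFwd : Bool) : Bool :=
  (forest.foldl
    (fun root node =>
      if ((PySem.Int.mod node 2 == PySem.Int.mod (((g.getD node []).length : Int) - 1) 2) != isFwd)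
      then root + 1 else root) (0 : Int)) == 1

def solution (nodes : List Int) (edges : List (Int × Int)) : List Int :=
  let graph := buildGraphA edges
  let fuel := nodes.length + 2 * edges.length + 1
  let st := nodes.foldl
    (fun (st : List (List Int) × List Int) node =>
      if node ∈ st.2 then st
      else
        let fv := dfsA graph fuel [] st.2 node
        (st.1 ++ [fv.1], fv.2))
    ([], [])
  let ans := st.1.foldl
    (fun (a : Int × Int) forest =>
      (a.1 + (if isTreeA graph forest true then 1 else 0),
       a.2 + (if isTreeA graph forest false then 1 else 0)))
    ((0 : Int), (0 : Int))
  [ans.1, ans.2]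

-- ===== PORT B =====
-- graph.setdefault(u, []).append(v) etc.
def buildGraphB (edges : List (Int × Int)) : PySem.Dict Int (List Int) :=
  edges.foldl (fun g e => (g.modify e.1 [] (· ++ [e.2])).modify e.2 [] (· ++ [e.1]))
    PySem.Dict.empty

-- cur % 2 == (deg - 1) % 2
def nodeCondB (g : PySem.Dict Int (List Int)) (cur : Int) : Bool :=
  PySem.Int.mod cur 2 == PySem.Int.mod (((g.getD cur []).length : Int) - 1) 2

-- while stack: cur = stack.pop(); size += 1; t += cond; push unvisited neighbours (marking them)
-- (fuel only makes the loop total in Lean; it is never exhausted for the fuel the port passes)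
def stackRunB (g : PySem.Dict Int (List Int)) :
    Nat → List Int → List Int → Int → Int → List Int × Int × Int
  | 0, visited, _, size, t => (visited, size, t)
  | fuel+1, visited, stack, size, t =>
      match stack with
      | [] => (visited, size, t)
      | cur :: rest =>
        let size := size + 1
        let t := if nodeCondB g cur then t + 1 else t
        let vs := (g.getD cur []).foldl
          (fun (p : List Int × List Int) nn => if nn ∈ p.1 then p else (nn :: p.1, nn :: p.2))
          (visited, rest)
        stackRunB g fuel vs.1 vs.2 size t

def solution_alt (nodes : List Int) (edges : List (Int × Int)) : List Int :=
  let graph := buildGraphB edges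
  let fuel := nodes.length + 2 * edges.length + 1
  let st := nodes.foldl
    (fun (st : List Int × Int × Int) node =>
      if node ∈ st.1 then st
      else
        let r := stackRunB graph fuel (node :: st.1) [node] 0 0
        (r.1, st.2.1 + (if r.2.1 - r.2.2 == 1 then 1 else 0),
              st.2.2 + (if r.2.2 == 1 then 1 else 0)))
    ([], (0 : Int), (0 : Int))
  [st.2.1, st.2.2]

-- ===== PRECONDITION & SPEC =====
def Spec_solution (nodes : List Int) (edges : List (Int × Int)) (out : List Int) : Prop := out = solution_alt nodes edges
instance (nodes : List Int) (edges : List (Int × Int)) (out : List Int) : Decidable (Spec_solution nodes edges out) := by unfold Spec_solution; infer_instance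

-- ===== CLAIM (what is proved, stated in full; the proofs are below) =====
def Claim_equal_solution : Prop := ∀ (nodes : List Int) (edges : List (Int × Int)), Dom_solution nodes edges → Spec_solution nodes edges (solution nodes edges)

-- ===== LEMMAS AND PROOFS =====

lemma pvCard_lt (U : Finset Int) (V V' : List Int) (n : Int) (hn : n ∈ U) (hnV : n ∉ V)
    (hsub : ∀ y ∈ V, y ∈ V') (hn' : n ∈ V') :
    (U.filter (fun x => x ∉ V')).card < (U.filter (fun x => x ∉ V)).card := by
  apply Finset.card_lt_card
  constructor
  · intro x hx
    simp only [Finset.mem_filter] at *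
    exact ⟨hx.1, fun hv => hx.2 (hsub x hv)⟩
  · intro hcon
    have h1 : n ∈ U.filter (fun x => x ∉ V) := by simp [hn, hnV]
    have := hcon h1
    simp only [Finset.mem_filter] at this
    exact this.2 hn'
lemma pvCard_push (U : Finset Int) (V P : List Int) (hP : P.Nodup) (hPU : ∀ x ∈ P, x ∈ U) (hPV : ∀ x ∈ P, x ∉ V) :
    (U.filter (fun x => x ∉ P ++ V)).card + P.length ≤ (U.filter (fun x => x ∉ V)).card := by
  have hset : U.filter (fun x => x ∉ P ++ V) = (U.filter (fun x => x ∉ V)) \ P.toFinset := by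
    ext x; simp only [Finset.mem_filter, Finset.mem_sdiff, List.mem_append, List.mem_toFinset]
    tauto
  have hsub : P.toFinset ⊆ U.filter (fun x => x ∉ V) := by
    intro x hx; simp only [List.mem_toFinset] at hx
    simp only [Finset.mem_filter]; exact ⟨hPU x hx, hPV x hx⟩
  rw [hset, Finset.card_sdiff_of_subset hsub]
  have h2 : P.toFinset.card = P.length := List.toFinset_card_of_nodup hP
  have := Finset.card_le_card hsub
  omega
lemma pvCount_not (l : List Int) (p : Int → Bool) : l.countP (fun x => !p x) + l.countP p = l.length := by
  induction l with
  | nil => simp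
  | cons a l ih =>
    simp only [List.countP_cons, List.length_cons]
    cases h : p a <;> simp [h] <;> omega

inductive pvReach (g : PySem.Dict Int (List Int)) (V : List Int) (n : Int) : Int → Prop
  | base : pvReach g V n n
  | step (m m' : Int) : pvReach g V n m → m ∉ V → m' ∈ g.getD m [] → pvReach g V n m'

lemma pvReach_congr (g : PySem.Dict Int (List Int)) (V V' : List Int) (n x : Int)
    (hV : ∀ y : Int, y ∈ V ↔ y ∈ V') (h : pvReach g V n x) : pvReach g V' n x := by
  induction h with
  | base => exact pvReach.base
  | step m m' _ hm hmem ih => exact pvReach.step m m' ih (fun hc => hm ((hV m).mpr hc)) hmem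

lemma pvReach_anti (g : PySem.Dict Int (List Int)) (V V' : List Int) (n x : Int)
    (hsub : ∀ y ∈ V, y ∈ V') (h : pvReach g V' n x) : pvReach g V n x := by
  induction h with
  | base => exact pvReach.base
  | step m m' _ hm hmem ih => exact pvReach.step m m' ih (fun hc => hm (hsub m hc)) hmem

lemma pvReach_trans (g : PySem.Dict Int (List Int)) (V : List Int) (n m x : Int)
    (h1 : pvReach g V n m) (h2 : pvReach g V m x) : pvReach g V n x := by
  induction h2 with
  | base => exact h1
  | step a a' _ ha hmem ih => exact pvReach.step a a' ih ha hmem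

lemma pvReach_complete (g : PySem.Dict Int (List Int)) (V Δ : List Int) (n : Int)
    (hn : n ∈ Δ) (hcl : ∀ x ∈ Δ, ∀ y ∈ g.getD x [], y ∈ Δ ∨ y ∈ V) :
    ∀ x : Int, pvReach g V n x → x ∈ Δ ∨ x ∈ V := by
  intro x h
  induction h with
  | base => exact Or.inl hn
  | step m m' _ hm hmem ih =>
    rcases ih with h | h
    · exact hcl m h m' hmem
    · exact absurd h hm

lemma dfsA_spec (g : PySem.Dict Int (List Int)) (U : Finset Int)
    (hg : ∀ x : Int, ∀ y ∈ g.getD x [], y ∈ U) :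
    ∀ fuel : Nat, ∀ V forest : List Int, ∀ n : Int, n ∈ U → n ∉ V →
    (U.filter (fun x => x ∉ V)).card < fuel →
    ∃ Δ : List Int,
      dfsA g fuel forest V n = (forest ++ Δ, Δ.reverse ++ V) ∧
      n ∈ Δ ∧ Δ.Nodup ∧ (∀ x ∈ Δ, x ∉ V) ∧ (∀ x ∈ Δ, x ∈ U) ∧
      (∀ x ∈ Δ, pvReach g V n x) ∧
      (∀ x ∈ Δ, ∀ y ∈ g.getD x [], y ∈ Δ ∨ y ∈ V) := by
  intro fuel
  induction fuel with
  | zero => intro V forest n _ _ hcard; omega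
  | succ k IH =>
    intro V forest n hnU hnV hcard
    have fold : ∀ ns : List Int, (∀ y ∈ ns, y ∈ g.getD n []) →
        ∀ forest1 Δ₀ : List Int,
        n ∈ Δ₀ → Δ₀.Nodup → (∀ x ∈ Δ₀, x ∉ V) → (∀ x ∈ Δ₀, x ∈ U) →
        (∀ x ∈ Δ₀, pvReach g V n x) →
        (∀ x ∈ Δ₀, x ≠ n → ∀ y ∈ g.getD x [], y ∈ Δ₀ ∨ y ∈ V) →
        ∃ Δ₁ : List Int,
          ns.foldl (fun st nn => if nn ∈ st.2 then st else dfsA g k st.1 st.2 nn)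
              (forest1, Δ₀.reverse ++ V)
            = (forest1 ++ Δ₁, (Δ₀ ++ Δ₁).reverse ++ V) ∧
          (Δ₀ ++ Δ₁).Nodup ∧ (∀ x ∈ Δ₁, x ∉ V) ∧ (∀ x ∈ Δ₁, x ∈ U) ∧
          (∀ x ∈ Δ₁, pvReach g V n x) ∧
          (∀ x ∈ Δ₀ ++ Δ₁, x ≠ n → ∀ y ∈ g.getD x [], y ∈ Δ₀ ++ Δ₁ ∨ y ∈ V) ∧
          (∀ y ∈ ns, y ∈ Δ₀ ++ Δ₁ ∨ y ∈ V) := by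
      intro ns
      induction ns with
      | nil =>
        intro _ forest1 Δ₀ h1 h2 h3 h4 h5 h6
        exact ⟨[], by simp, by simpa using h2, by simp, by simp, by simp,
          by simpa using h6, by simp⟩
      | cons y ns' ihns =>
        intro hns forest1 Δ₀ h1 h2 h3 h4 h5 h6
        by_cases hy : y ∈ Δ₀.reverse ++ V
        · have hy' : y ∈ Δ₀ ∨ y ∈ V := by
            rcases List.mem_append.mp hy with h | h
            · exact Or.inl (List.mem_reverse.mp h)
            · exact Or.inr h
          simp only [List.foldl_cons, if_pos hy]
          obtain ⟨Δ₁, heq, hnd, hv, hu, hr, hcl, hproc⟩ :=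
            ihns (fun z hz => hns z (List.mem_cons_of_mem _ hz)) forest1 Δ₀ h1 h2 h3 h4 h5 h6
          refine ⟨Δ₁, heq, hnd, hv, hu, hr, hcl, ?_⟩
          intro z hz
          rcases List.mem_cons.mp hz with rfl | hz'
          · rcases hy' with h | h
            · exact Or.inl (List.mem_append.mpr (Or.inl h))
            · exact Or.inr h
          · exact hproc z hz'
        · -- y not visited: recursive dfsA call
          have hyΔ : y ∉ Δ₀ := fun hc => hy (List.mem_append.mpr (Or.inl (List.mem_reverse.mpr hc)))
          have hyV : y ∉ V := fun hc => hy (List.mem_append.mpr (Or.inr hc))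
          have hyU : y ∈ U := hg n y (hns y (List.mem_cons_self))
          have hcard' : (U.filter (fun x => x ∉ Δ₀.reverse ++ V)).card < k := by
            have := pvCard_lt U V (Δ₀.reverse ++ V) n hnU hnV
              (fun z hz => List.mem_append.mpr (Or.inr hz))
              (List.mem_append.mpr (Or.inl (List.mem_reverse.mpr h1)))
            omega
          obtain ⟨Δ', heq', hyΔ', hnd', hv', hu', hr', hcl'⟩ :=
            IH (Δ₀.reverse ++ V) forest1 y hyU hy hcard'
          simp only [List.foldl_cons, if_neg hy]
          -- facts about Δ'
          have hΔ'V : ∀ x ∈ Δ', x ∉ V := fun x hx hc =>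
            hv' x hx (List.mem_append.mpr (Or.inr hc))
          have hΔ'Δ₀ : ∀ x ∈ Δ', x ∉ Δ₀ := fun x hx hc =>
            hv' x hx (List.mem_append.mpr (Or.inl (List.mem_reverse.mpr hc)))
          have hreachy : pvReach g V n y :=
            pvReach.step n y pvReach.base hnV (hns y List.mem_cons_self)
          have hΔ'r : ∀ x ∈ Δ', pvReach g V n x := by
            intro x hx
            exact pvReach_trans g V n y x hreachy
              (pvReach_anti g V (Δ₀.reverse ++ V) y x
                (fun z hz => List.mem_append.mpr (Or.inr hz)) (hr' x hx))
          have hnd2 : (Δ₀ ++ Δ').Nodup :=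
            List.Nodup.append h2 hnd' (fun a ha hb => hΔ'Δ₀ a hb ha)
          obtain ⟨Δ₁', heq₁, hnd₁, hv₁, hu₁, hr₁, hcl₁, hproc₁⟩ :=
            ihns (fun z hz => hns z (List.mem_cons_of_mem _ hz)) (forest1 ++ Δ') (Δ₀ ++ Δ')
              (List.mem_append.mpr (Or.inl h1)) hnd2
              (fun x hx => (List.mem_append.mp hx).elim (h3 x) (hΔ'V x))
              (fun x hx => (List.mem_append.mp hx).elim (h4 x) (hu' x))
              (fun x hx => (List.mem_append.mp hx).elim (h5 x) (hΔ'r x))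
              (by
                intro x hx hxn z hz
                rcases List.mem_append.mp hx with h | h
                · rcases h6 x h hxn z hz with h' | h'
                  · exact Or.inl (List.mem_append.mpr (Or.inl h'))
                  · exact Or.inr h'
                · rcases hcl' x h z hz with h' | h'
                  · exact Or.inl (List.mem_append.mpr (Or.inr h'))
                  · rcases List.mem_append.mp h' with h'' | h''
                    · exact Or.inl (List.mem_append.mpr (Or.inl (List.mem_reverse.mp h'')))
                    · exact Or.inr h'')
          refine ⟨Δ' ++ Δ₁', ?_, ?_, ?_, ?_, ?_, ?_, ?_⟩
          · rw [heq']
            have : Δ'.reverse ++ (Δ₀.reverse ++ V) = (Δ₀ ++ Δ').reverse ++ V := by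
              rw [List.reverse_append]; simp [List.append_assoc]
            rw [this, heq₁]
            simp [List.append_assoc]
          · simpa [List.append_assoc] using hnd₁
          · intro x hx
            rcases List.mem_append.mp hx with h | h
            · exact hΔ'V x h
            · exact hv₁ x h
          · intro x hx
            rcases List.mem_append.mp hx with h | h
            · exact hu' x h
            · exact hu₁ x h
          · intro x hx
            rcases List.mem_append.mp hx with h | h
            · exact hΔ'r x h
            · exact hr₁ x h
          · intro x hx hxn z hz
            have hx' : x ∈ (Δ₀ ++ Δ') ++ Δ₁' := by simpa [List.append_assoc] using hx
            rcases hcl₁ x hx' hxn z hz with h | h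
            · exact Or.inl (by simpa [List.append_assoc] using h)
            · exact Or.inr h
          · intro z hz
            rcases List.mem_cons.mp hz with rfl | hz'
            · exact Or.inl (List.mem_append.mpr (Or.inr (List.mem_append.mpr (Or.inl hyΔ'))))
            · rcases hproc₁ z hz' with h | h
              · exact Or.inl (by simpa [List.append_assoc] using h)
              · exact Or.inr h
    -- apply fold with Δ₀ = [n]
    obtain ⟨Δ₁, heq, hnd, hv, hu, hr, hcl, hproc⟩ :=
      fold (g.getD n []) (fun _ hz => hz) (forest ++ [n]) [n]
        List.mem_cons_self (List.nodup_singleton n)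
        (fun x hx => by rcases List.mem_singleton.mp hx with rfl; exact hnV)
        (fun x hx => by rcases List.mem_singleton.mp hx with rfl; exact hnU)
        (fun x hx => by rcases List.mem_singleton.mp hx with rfl; exact pvReach.base)
        (fun x hx hxn => by rcases List.mem_singleton.mp hx with rfl; exact absurd rfl hxn)
    refine ⟨n :: Δ₁, ?_, List.mem_cons_self, ?_, ?_, ?_, ?_, ?_⟩
    · show (g.getD n []).foldl _ (forest ++ [n], n :: V) = _
      have h0 : (forest ++ [n], n :: V) = (forest ++ [n], ([n] : List Int).reverse ++ V) := by simp
      rw [h0, heq]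
      simp [List.append_assoc]
    · simpa using hnd
    · intro x hx
      rcases List.mem_cons.mp hx with rfl | hx'
      · exact hnV
      · exact hv x hx'
    · intro x hx
      rcases List.mem_cons.mp hx with rfl | hx'
      · exact hnU
      · exact hu x hx'
    · intro x hx
      rcases List.mem_cons.mp hx with rfl | hx'
      · exact pvReach.base
      · exact hr x hx'
    · intro x hx z hz
      by_cases hxn : x = n
      · subst hxn
        rcases hproc z hz with h | h
        · exact Or.inl (by simpa using h)
        · exact Or.inr h
      · have hx' : x ∈ [n] ++ Δ₁ := by simpa using hx
        rcases hcl x hx' hxn z hz with h | h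
        · exact Or.inl (by simpa using h)
        · exact Or.inr h

lemma pvPush (ns : List Int) :
    ∀ V s : List Int, ∃ P : List Int,
      ns.foldl (fun (p : List Int × List Int) nn => if nn ∈ p.1 then p else (nn :: p.1, nn :: p.2)) (V, s)
        = (P ++ V, P ++ s) ∧
      P.Nodup ∧ (∀ x ∈ P, x ∉ V) ∧ (∀ x ∈ P, x ∈ ns) ∧ (∀ y ∈ ns, y ∈ P ∨ y ∈ V) := by
  induction ns with
  | nil => intro V s; exact ⟨[], by simp, by simp, by simp, by simp, by simp⟩
  | cons nn ns' ih =>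
    intro V s
    by_cases h : nn ∈ V
    · obtain ⟨P, heq, hnd, hv, hm, hproc⟩ := ih V s
      refine ⟨P, by simp [h, heq], hnd, hv,
        fun x hx => List.mem_cons_of_mem _ (hm x hx), ?_⟩
      intro y hy
      rcases List.mem_cons.mp hy with rfl | hy'
      · exact Or.inr h
      · exact hproc y hy'
    · obtain ⟨P', heq, hnd, hv, hm, hproc⟩ := ih (nn :: V) (nn :: s)
      refine ⟨P' ++ [nn], ?_, ?_, ?_, ?_, ?_⟩
      · simp only [List.foldl_cons, if_neg h, heq]
        simp [List.append_assoc]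
      · refine List.Nodup.append hnd (List.nodup_singleton nn) ?_
        intro a ha hb
        rcases List.mem_singleton.mp hb with rfl
        exact hv a ha List.mem_cons_self
      · intro x hx
        rcases List.mem_append.mp hx with hx' | hx'
        · exact fun hc => hv x hx' (List.mem_cons_of_mem _ hc)
        · rcases List.mem_singleton.mp hx' with rfl; exact h
      · intro x hx
        rcases List.mem_append.mp hx with hx' | hx'
        · exact List.mem_cons_of_mem _ (hm x hx')
        · rcases List.mem_singleton.mp hx' with rfl; exact List.mem_cons_self
      · intro y hy
        rcases List.mem_cons.mp hy with rfl | hy'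
        · exact Or.inl (List.mem_append.mpr (Or.inr List.mem_cons_self))
        · rcases hproc y hy' with h' | h'
          · exact Or.inl (List.mem_append.mpr (Or.inl h'))
          · rcases List.mem_cons.mp h' with rfl | h''
            · exact Or.inl (List.mem_append.mpr (Or.inr List.mem_cons_self))
            · exact Or.inr h''

lemma stackRunB_spec (g : PySem.Dict Int (List Int)) (U : Finset Int)
    (hg : ∀ x : Int, ∀ y ∈ g.getD x [], y ∈ U) (n : Int) (V₀ : List Int) :
    ∀ fuel : Nat, ∀ D stack V : List Int, ∀ size t : Int,
    (∀ x : Int, x ∈ V ↔ x ∈ D ∨ x ∈ stack ∨ x ∈ V₀) →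
    (D ++ stack).Nodup →
    (∀ x ∈ D ++ stack, x ∉ V₀) →
    (∀ x ∈ D ++ stack, x ∈ U) →
    (∀ x ∈ D ++ stack, pvReach g V₀ n x) →
    (∀ x ∈ D, ∀ y ∈ g.getD x [], y ∈ V) →
    stack.length + (U.filter (fun x => x ∉ V)).card < fuel →
    ∃ VN W : List Int,
      stackRunB g fuel V stack size t
        = (W, size + ((stack.length + VN.length : Nat) : Int),
             t + (((stack ++ VN).countP (fun x => nodeCondB g x) : Nat) : Int)) ∧
      (∀ x : Int, x ∈ W ↔ x ∈ VN ∨ x ∈ V) ∧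
      VN.Nodup ∧ (∀ x ∈ VN, x ∉ V) ∧ (∀ x ∈ VN, pvReach g V₀ n x) ∧
      (∀ x : Int, (x ∈ D ∨ x ∈ stack ∨ x ∈ VN) → ∀ y ∈ g.getD x [], y ∈ W) := by
  intro fuel
  induction fuel with
  | zero => intro D stack V size t _ _ _ _ _ _ hf; omega
  | succ k IH =>
    intro D stack V size t hV hnd hdisj hU hreach hcl hf
    match stack with
    | [] =>
      refine ⟨[], V, by simp [stackRunB], by simp, by simp, by simp, by simp, ?_⟩
      intro x hx y hy
      rcases hx with hx | hx | hx
      · exact hcl x hx y hy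
      · simp at hx
      · simp at hx
    | cur :: rest =>
      -- one iteration
      have hcur_ds : cur ∈ D ++ cur :: rest := List.mem_append.mpr (Or.inr List.mem_cons_self)
      obtain ⟨P, hpush, hPnd, hPV, hPns, hPproc⟩ := pvPush (g.getD cur []) V rest
      -- decompose nodup of D ++ cur :: rest
      have hnd' := hnd
      rw [List.nodup_append] at hnd'
      obtain ⟨hndD, hndcr, hdisjDcr⟩ := hnd'
      have hcurD : cur ∉ D := fun hc => hdisjDcr cur hc cur List.mem_cons_self rfl
      have hcurrest : cur ∉ rest := (List.nodup_cons.mp hndcr).1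
      have hndrest : rest.Nodup := (List.nodup_cons.mp hndcr).2
      -- P is fresh: not in D, cur, rest, V₀
      have hPD : ∀ x ∈ P, x ∉ D := fun x hx hc => hPV x hx ((hV x).mpr (Or.inl hc))
      have hPcur : ∀ x ∈ P, x ≠ cur := fun x hx hc =>
        hPV x hx ((hV x).mpr (Or.inr (Or.inl (hc ▸ List.mem_cons_self))))
      have hPrest : ∀ x ∈ P, x ∉ rest := fun x hx hc =>
        hPV x hx ((hV x).mpr (Or.inr (Or.inl (List.mem_cons_of_mem _ hc))))
      have hPV₀ : ∀ x ∈ P, x ∉ V₀ := fun x hx hc => hPV x hx ((hV x).mpr (Or.inr (Or.inr hc)))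
      have hPU : ∀ x ∈ P, x ∈ U := fun x hx => hg cur x (hPns x hx)
      have hcurV₀ : cur ∉ V₀ := hdisj cur hcur_ds
      have hreachcur : pvReach g V₀ n cur := hreach cur hcur_ds
      have hPreach : ∀ x ∈ P, pvReach g V₀ n x := fun x hx =>
        pvReach.step cur x hreachcur hcurV₀ (hPns x hx)
      -- new state invariants
      have hV' : ∀ x : Int, x ∈ P ++ V ↔ x ∈ D ++ [cur] ∨ x ∈ P ++ rest ∨ x ∈ V₀ := by
        intro x
        simp only [List.mem_append, List.mem_cons, hV x]
        tauto
      have hnd2 : ((D ++ [cur]) ++ (P ++ rest)).Nodup := by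
        rw [List.nodup_append]
        refine ⟨?_, ?_, ?_⟩
        · rw [List.nodup_append]
          refine ⟨hndD, List.nodup_singleton cur, ?_⟩
          intro a ha b hb
          rcases List.mem_singleton.mp hb with rfl
          exact fun hc => hcurD (hc ▸ ha)
        · rw [List.nodup_append]
          refine ⟨hPnd, hndrest, ?_⟩
          intro a ha b hb hc
          exact hPrest a ha (hc ▸ hb)
        · intro a ha b hb hc
          subst hc
          rcases List.mem_append.mp hb with hb' | hb'
          · rcases List.mem_append.mp ha with ha' | ha'
            · exact hPD a hb' ha'
            · exact hPcur a hb' (List.mem_singleton.mp ha')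
          · rcases List.mem_append.mp ha with ha' | ha'
            · exact hdisjDcr a ha' a (List.mem_cons_of_mem _ hb') rfl
            · exact hcurrest ((List.mem_singleton.mp ha') ▸ hb')
      have hdisj2 : ∀ x ∈ (D ++ [cur]) ++ (P ++ rest), x ∉ V₀ := by
        intro x hx
        rcases List.mem_append.mp hx with hx' | hx'
        · rcases List.mem_append.mp hx' with h | h
          · exact hdisj x (List.mem_append.mpr (Or.inl h))
          · rcases List.mem_singleton.mp h with rfl; exact hcurV₀
        · rcases List.mem_append.mp hx' with h | h
          · exact hPV₀ x h
          · exact hdisj x (List.mem_append.mpr (Or.inr (List.mem_cons_of_mem _ h)))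
      have hU2 : ∀ x ∈ (D ++ [cur]) ++ (P ++ rest), x ∈ U := by
        intro x hx
        rcases List.mem_append.mp hx with hx' | hx'
        · rcases List.mem_append.mp hx' with h | h
          · exact hU x (List.mem_append.mpr (Or.inl h))
          · have := hU cur hcur_ds; rwa [List.mem_singleton.mp h]
        · rcases List.mem_append.mp hx' with h | h
          · exact hPU x h
          · exact hU x (List.mem_append.mpr (Or.inr (List.mem_cons_of_mem _ h)))
      have hreach2 : ∀ x ∈ (D ++ [cur]) ++ (P ++ rest), pvReach g V₀ n x := by
        intro x hx
        rcases List.mem_append.mp hx with hx' | hx'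
        · rcases List.mem_append.mp hx' with h | h
          · exact hreach x (List.mem_append.mpr (Or.inl h))
          · rcases List.mem_singleton.mp h with rfl; exact hreachcur
        · rcases List.mem_append.mp hx' with h | h
          · exact hPreach x h
          · exact hreach x (List.mem_append.mpr (Or.inr (List.mem_cons_of_mem _ h)))
      have hcl2 : ∀ x ∈ D ++ [cur], ∀ y ∈ g.getD x [], y ∈ P ++ V := by
        intro x hx y hy
        rcases List.mem_append.mp hx with h | h
        · exact List.mem_append.mpr (Or.inr (hcl x h y hy))
        · rcases List.mem_singleton.mp h with rfl
          rcases hPproc y hy with h' | h'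
          · exact List.mem_append.mpr (Or.inl h')
          · exact List.mem_append.mpr (Or.inr h')
      have hf2 : (P ++ rest).length + (U.filter (fun x => x ∉ P ++ V)).card < k := by
        have := pvCard_push U V P hPnd hPU hPV
        simp only [List.length_append, List.length_cons] at *
        omega
      obtain ⟨VN', W, heqr, hWmem, hVN'nd, hVN'V, hVN'reach, hWcl⟩ :=
        IH (D ++ [cur]) (P ++ rest) (P ++ V) (size + 1)
          (if nodeCondB g cur then t + 1 else t) hV' hnd2 hdisj2 hU2 hreach2 hcl2 hf2
      refine ⟨P ++ VN', W, ?_, ?_, ?_, ?_, ?_, ?_⟩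
      · show stackRunB g (k+1) V (cur :: rest) size t = _
        simp only [stackRunB, hpush]
        rw [heqr]
        refine congrArg (Prod.mk W) ?_
        refine congrArg₂ Prod.mk ?_ ?_
        · push_cast
          simp only [List.length_append, List.length_cons]
          push_cast
          ring
        · simp only [List.countP_append, List.countP_cons]
          cases h : nodeCondB g cur <;> simp [h] <;> push_cast <;> ring_nf
      · intro x
        rw [hWmem x]
        simp only [List.mem_append]
        tauto
      · refine List.Nodup.append hPnd hVN'nd ?_
        intro a ha hb
        exact hVN'V a hb (List.mem_append.mpr (Or.inl ha))
      · intro x hx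
        rcases List.mem_append.mp hx with h | h
        · exact hPV x h
        · exact fun hc => hVN'V x h (List.mem_append.mpr (Or.inr hc))
      · intro x hx
        rcases List.mem_append.mp hx with h | h
        · exact hPreach x h
        · exact hVN'reach x h
      · intro x hx y hy
        apply hWcl x ?_ y hy
        simp only [List.mem_append, List.mem_cons] at hx ⊢
        tauto

lemma pvComponent (g : PySem.Dict Int (List Int)) (U : Finset Int)
    (hg : ∀ x : Int, ∀ y ∈ g.getD x [], y ∈ U) (fuel : Nat) (hfuel : U.card < fuel)
    (VA VB : List Int) (n : Int) (hnU : n ∈ U)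
    (hmem : ∀ x : Int, x ∈ VA ↔ x ∈ VB) (hnA : n ∉ VA) :
    ∃ (ΔA VN W : List Int),
      dfsA g fuel [] VA n = (ΔA, ΔA.reverse ++ VA) ∧
      stackRunB g fuel (n :: VB) [n] 0 0
        = (W, (0:Int) + (((1 + VN.length : Nat)) : Int),
             (0:Int) + (((n :: VN).countP (fun x => nodeCondB g x) : Nat) : Int)) ∧
      (∀ x : Int, x ∈ ΔA.reverse ++ VA ↔ x ∈ W) ∧
      ΔA.Perm (n :: VN) := by
  have hnB : n ∉ VB := fun hc => hnA ((hmem n).mpr hc)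
  have hcardA : (U.filter (fun x => x ∉ VA)).card < fuel :=
    lt_of_le_of_lt (le_trans (Finset.card_filter_le U _) (le_refl _)) hfuel
  obtain ⟨ΔA, heqA, hnΔA, hndA, hΔAV, hΔAU, hΔAreach, hΔAcl⟩ :=
    dfsA_spec g U hg fuel VA [] n hnU hnA hcardA
  have hcardB : ([n] : List Int).length + (U.filter (fun x => x ∉ n :: VB)).card < fuel := by
    have h1 : (U.filter (fun x => x ∉ (n :: VB))).card < (U.filter (fun x => x ∉ VB)).card :=
      pvCard_lt U VB (n :: VB) n hnU hnB (fun y hy => List.mem_cons_of_mem _ hy) List.mem_cons_self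
    have h2 : (U.filter (fun x => x ∉ VB)).card ≤ U.card := Finset.card_filter_le U _
    simp only [List.length_singleton]
    omega
  obtain ⟨VN, W, heqB, hWmem, hndVN, hVNV, hVNreach, hWcl⟩ :=
    stackRunB_spec g U hg n VB fuel [] [n] (n :: VB) 0 0
      (by intro x; simp)
      (by simp)
      (by intro x hx; simp at hx; subst hx; exact hnB)
      (by intro x hx; simp at hx; subst hx; exact hnU)
      (by intro x hx; simp at hx; subst hx; exact pvReach.base)
      (by intro x hx; simp at hx)
      hcardB
  have hnVN : n ∉ VN := fun hc => hVNV n hc List.mem_cons_self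
  -- characterizations
  have hAchar : ∀ x : Int, x ∈ ΔA ↔ (pvReach g VA n x ∧ x ∉ VA) := by
    intro x
    constructor
    · intro hx; exact ⟨hΔAreach x hx, hΔAV x hx⟩
    · rintro ⟨hr, hv⟩
      rcases pvReach_complete g VA ΔA n hnΔA hΔAcl x hr with h | h
      · exact h
      · exact absurd h hv
  have hBclosure : ∀ x ∈ n :: VN, ∀ y ∈ g.getD x [], y ∈ n :: VN ∨ y ∈ VB := by
    intro x hx y hy
    have hx' : x ∈ ([] : List Int) ∨ x ∈ [n] ∨ x ∈ VN := by
      rcases List.mem_cons.mp hx with rfl | h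
      · exact Or.inr (Or.inl List.mem_cons_self)
      · exact Or.inr (Or.inr h)
    have hyW := hWcl x hx' y hy
    rcases (hWmem y).mp hyW with h | h
    · exact Or.inl (List.mem_cons_of_mem _ h)
    · rcases List.mem_cons.mp h with rfl | h'
      · exact Or.inl List.mem_cons_self
      · exact Or.inr h'
  have hBchar : ∀ x : Int, x ∈ n :: VN ↔ (pvReach g VB n x ∧ x ∉ VB) := by
    intro x
    constructor
    · intro hx
      rcases List.mem_cons.mp hx with rfl | h
      · exact ⟨pvReach.base, hnB⟩
      · exact ⟨hVNreach x h, fun hc => hVNV x h (List.mem_cons_of_mem _ hc)⟩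
    · rintro ⟨hr, hv⟩
      rcases pvReach_complete g VB (n :: VN) n List.mem_cons_self hBclosure x hr with h | h
      · exact h
      · exact absurd h hv
  have hsetEq : ∀ x : Int, x ∈ ΔA ↔ x ∈ n :: VN := by
    intro x
    rw [hAchar x, hBchar x]
    constructor
    · rintro ⟨hr, hv⟩
      exact ⟨pvReach_congr g VA VB n x hmem hr, fun hc => hv ((hmem x).mpr hc)⟩
    · rintro ⟨hr, hv⟩
      exact ⟨pvReach_congr g VB VA n x (fun y => (hmem y).symm) hr, fun hc => hv ((hmem x).mp hc)⟩
  have hndB : (n :: VN).Nodup := List.nodup_cons.mpr ⟨hnVN, hndVN⟩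
  have hperm : ΔA.Perm (n :: VN) := (List.perm_ext_iff_of_nodup hndA hndB).mpr hsetEq
  refine ⟨ΔA, VN, W, by simpa using heqA, by simpa using heqB, ?_, hperm⟩
  intro x
  rw [hWmem x]
  simp only [List.mem_append, List.mem_reverse, List.mem_cons]
  rw [hsetEq x]
  simp only [List.mem_cons]
  constructor
  · rintro (h | h)
    · rcases h with h | h
      · exact Or.inr (Or.inl h)
      · exact Or.inl h
    · exact Or.inr (Or.inr ((hmem x).mp h))
  · rintro (h | h)
    · exact Or.inl (Or.inr h)
    · rcases h with h | h
      · exact Or.inl (Or.inl h)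
      · exact Or.inr ((hmem x).mpr h)

lemma pvIsTree (g : PySem.Dict Int (List Int)) (f : List Int) (isFwd : Bool) :
    isTreeA g f isFwd
      = (((f.countP (fun node => ((PySem.Int.mod node 2
          == PySem.Int.mod (((g.getD node []).length : Int) - 1) 2) != isFwd)) : Nat) : Int) == 1) := by
  unfold isTreeA
  rw [PySem.List.foldl_count_if]
  simp

lemma pvOuter (g : PySem.Dict Int (List Int)) (U : Finset Int)
    (hg : ∀ x : Int, ∀ y ∈ g.getD x [], y ∈ U) (fuel : Nat) (hfuel : U.card < fuel) :
    ∀ nodes : List Int, (∀ node ∈ nodes, node ∈ U) →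
    ∀ (VA VB : List Int) (forests : List (List Int)) (a0 a1 : Int),
    (∀ x : Int, x ∈ VA ↔ x ∈ VB) →
    (forests.foldl (fun (a : Int × Int) forest =>
        (a.1 + (if isTreeA g forest true then 1 else 0),
         a.2 + (if isTreeA g forest false then 1 else 0))) ((0:Int),(0:Int)) = (a0, a1)) →
    ((nodes.foldl (fun (st : List (List Int) × List Int) node =>
        if node ∈ st.2 then st
        else
          let fv := dfsA g fuel [] st.2 node
          (st.1 ++ [fv.1], fv.2)) (forests, VA)).1.foldl (fun (a : Int × Int) forest =>
        (a.1 + (if isTreeA g forest true then 1 else 0),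
         a.2 + (if isTreeA g forest false then 1 else 0))) ((0:Int),(0:Int)))
    = (nodes.foldl (fun (st : List Int × Int × Int) node =>
        if node ∈ st.1 then st
        else
          let r := stackRunB g fuel (node :: st.1) [node] 0 0
          (r.1, st.2.1 + (if r.2.1 - r.2.2 == 1 then 1 else 0),
                st.2.2 + (if r.2.2 == 1 then 1 else 0))) (VB, a0, a1)).2 := by
  intro nodes
  induction nodes with
  | nil =>
    intro _ VA VB forests a0 a1 _ hacc
    simp only [List.foldl_nil]
    exact hacc
  | cons node nodes' ih =>
    intro hnodes VA VB forests a0 a1 hmem hacc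
    simp only [List.foldl_cons]
    by_cases hn : node ∈ VA
    · rw [if_pos (show node ∈ (forests, VA).2 from hn),
         if_pos (show node ∈ (VB, a0, a1).1 from (hmem node).mp hn)]
      exact ih (fun z hz => hnodes z (List.mem_cons_of_mem _ hz)) VA VB forests a0 a1 hmem hacc
    · have hnB : node ∉ VB := fun hc => hn ((hmem node).mpr hc)
      rw [if_neg (show ¬ node ∈ (forests, VA).2 from hn),
         if_neg (show ¬ node ∈ (VB, a0, a1).1 from hnB)]
      obtain ⟨ΔA, VN, W, heqA, heqB, hmemNew, hperm⟩ :=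
        pvComponent g U hg fuel hfuel VA VB node (hnodes node List.mem_cons_self) hmem hn
      simp only [heqA, heqB]
      -- counting facts
      have hlen : ΔA.length = 1 + VN.length := by
        have h := hperm.length_eq
        simp only [List.length_cons] at h
        omega
      have hcount : ∀ p : Int → Bool, ΔA.countP p = (node :: VN).countP p :=
        fun p => hperm.countP_eq p
      -- forward tree flag equality
      have hT : isTreeA g ΔA true
          = (((0:Int) + ((1 + VN.length : Nat) : Int)) - ((0:Int) + (((node :: VN).countP (fun x => nodeCondB g x) : Nat) : Int)) == 1) := by
        rw [pvIsTree]
        have h1 : ΔA.countP (fun node => ((PySem.Int.mod node 2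
            == PySem.Int.mod (((g.getD node []).length : Int) - 1) 2) != true))
            = ΔA.countP (fun x => !(nodeCondB g x)) := by
          apply List.countP_congr
          intro a _
          simp [nodeCondB]
        have h2 : ΔA.countP (fun x => !(nodeCondB g x)) + ΔA.countP (fun x => nodeCondB g x) = ΔA.length :=
          pvCount_not ΔA (fun x => nodeCondB g x)
        have h3 := hcount (fun x => nodeCondB g x)
        rw [h1]
        congr 1
        push_cast
        omega
      have hF : isTreeA g ΔA false
          = (((0:Int) + (((node :: VN).countP (fun x => nodeCondB g x) : Nat) : Int)) == 1) := by
        rw [pvIsTree]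
        have h1 : ΔA.countP (fun node => ((PySem.Int.mod node 2
            == PySem.Int.mod (((g.getD node []).length : Int) - 1) 2) != false))
            = ΔA.countP (fun x => nodeCondB g x) := by
          apply List.countP_congr
          intro a _
          simp [nodeCondB]
        rw [h1, hcount (fun x => nodeCondB g x)]
        simp
      rw [ih (fun z hz => hnodes z (List.mem_cons_of_mem _ hz)) (ΔA.reverse ++ VA) W
        (forests ++ [ΔA])
        (a0 + (if isTreeA g ΔA true then 1 else 0))
        (a1 + (if isTreeA g ΔA false then 1 else 0))
        hmemNew
        (by rw [List.foldl_append, hacc]; simp)]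
      rw [hT, hF]

lemma pvFlatMapLen (edges : List (Int × Int)) :
    (edges.flatMap (fun e => [e.1, e.2])).length = 2 * edges.length := by
  induction edges with
  | nil => simp
  | cons e es ih => simp [ih]; omega

lemma pvGraphVals (edges : List (Int × Int)) (P : Int → Prop)
    (hP : ∀ e ∈ edges, P e.1 ∧ P e.2) :
    ∀ x y : Int, y ∈ (buildGraphA edges).getD x [] → P y := by
  unfold buildGraphA
  suffices h : ∀ (es : List (Int × Int)) (d : PySem.Dict Int (List Int)),
      (∀ x y : Int, y ∈ d.getD x [] → P y) → (∀ e ∈ es, P e.1 ∧ P e.2) →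
      ∀ x y : Int, y ∈ (es.foldl (fun g e => (g.modify e.1 [] (· ++ [e.2])).modify e.2 [] (· ++ [e.1])) d).getD x [] → P y by
    intro x y hy
    exact h edges PySem.Dict.empty (by intro x' y'; simp [PySem.Dict.getD_empty]) hP x y hy
  intro es
  induction es with
  | nil => intro d hd _ x y hy; exact hd x y hy
  | cons e es ih =>
    intro d hd hP' x y hy
    simp only [List.foldl_cons] at hy
    refine ih ((d.modify e.1 [] (· ++ [e.2])).modify e.2 [] (· ++ [e.1])) ?_
      (fun e' he' => hP' e' (List.mem_cons_of_mem _ he')) x y hy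
    intro x' y' hy'
    rw [PySem.Dict.getD_modify] at hy'
    split_ifs at hy' with h1
    · rcases List.mem_append.mp hy' with h | h
      · rw [PySem.Dict.getD_modify] at h
        split_ifs at h with h2
        · rcases List.mem_append.mp h with h' | h'
          · exact hd _ _ h'
          · rcases List.mem_singleton.mp h' with rfl
            exact (hP' e List.mem_cons_self).2
        · exact hd _ _ h
      · rcases List.mem_singleton.mp h with rfl
        exact (hP' e List.mem_cons_self).1
    · rw [PySem.Dict.getD_modify] at hy'
      split_ifs at hy' with h2
      · rcases List.mem_append.mp hy' with h | h
        · exact hd _ _ h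
        · rcases List.mem_singleton.mp h with rfl
          exact (hP' e List.mem_cons_self).2
      · exact hd _ _ hy'

lemma pvMain : ∀ (nodes : List Int) (edges : List (Int × Int)),
    solution nodes edges = solution_alt nodes edges := by
  intro nodes edges
  simp only [solution, solution_alt]
  have hbg : buildGraphB edges = buildGraphA edges := rfl
  rw [hbg]
  set g := buildGraphA edges with hgdef
  set U : Finset Int := (nodes ++ edges.flatMap (fun e => [e.1, e.2])).toFinset with hUdef
  have hg : ∀ x : Int, ∀ y ∈ g.getD x [], y ∈ U := by
    intro x y hy
    refine pvGraphVals edges (fun z => z ∈ U) ?_ x y hy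
    intro e he
    constructor
    · show e.1 ∈ (nodes ++ edges.flatMap (fun e => [e.1, e.2])).toFinset
      rw [List.mem_toFinset]
      exact List.mem_append.mpr (Or.inr (List.mem_flatMap.mpr ⟨e, he, by simp⟩))
    · show e.2 ∈ (nodes ++ edges.flatMap (fun e => [e.1, e.2])).toFinset
      rw [List.mem_toFinset]
      exact List.mem_append.mpr (Or.inr (List.mem_flatMap.mpr ⟨e, he, by simp⟩))
  have hfuel : U.card < nodes.length + 2 * edges.length + 1 := by
    have h1 : U.card ≤ (nodes ++ edges.flatMap (fun e => [e.1, e.2])).length :=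
      List.toFinset_card_le _
    rw [List.length_append, pvFlatMapLen] at h1
    omega
  have hnodes : ∀ node ∈ nodes, node ∈ U := by
    intro node hn
    rw [hUdef, List.mem_toFinset]
    exact List.mem_append.mpr (Or.inl hn)
  have hmain := pvOuter g U hg (nodes.length + 2 * edges.length + 1) hfuel nodes hnodes
    [] [] [] 0 0 (by simp) (by simp)
  rw [hmain]

-- ===== VERDICT (by name: the statement is the Claim_ definition above) =====
theorem solution_spec : Claim_equal_solution := by
  unfold Claim_equal_solution Spec_solution
  intro nodes edges _
  exact pvMain nodes edges
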